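-- pv_equiv track=rewrite | github.com/deasymaharani/Grok-Learning | C8-LIST/sorted words.py | sorted_words
-- ===== SOURCE A (Python) =====
-- def sorted_words(wordlist):
--     sortedlist = []
--     returnlist = []
--     for i in range (0,len(wordlist)):
--         sortedlist.append(sorted(wordlist[i]))
--
--     wordfix=[]
--     word = ''
--     for i in range (0, len(sortedlist)):
--         for j in range (0, len(sortedlist[i])):
--             word = word+sortedlist[i][j]
--         wordfix.append(word)
--         word = ''
--
--     for i in range(len(wordfix)):
--         if wordfix[i] == wordlist[i]:
--             returnlist.append(wordfix[i])
--
--     returnlist.sort()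
--
--     return returnlist
-- ===== SOURCE B (Python) =====
-- def sorted_words(wordlist):
--     return sorted(w for w in wordlist if all(map(str.__le__, w, w[1:])))
-- ===== Notes on version B (the rewrite author's own statement) =====
-- stated objective: faster
-- what changed: Instead of sorting each word, joining the sorted characters back into a string and comparing indexed parallel lists, B keeps exactly the words whose adjacent character pairs are non-decreasing (one linear scan per word, no per-word sort or string rebuild) and sorts the survivors.
import Mathlib
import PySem

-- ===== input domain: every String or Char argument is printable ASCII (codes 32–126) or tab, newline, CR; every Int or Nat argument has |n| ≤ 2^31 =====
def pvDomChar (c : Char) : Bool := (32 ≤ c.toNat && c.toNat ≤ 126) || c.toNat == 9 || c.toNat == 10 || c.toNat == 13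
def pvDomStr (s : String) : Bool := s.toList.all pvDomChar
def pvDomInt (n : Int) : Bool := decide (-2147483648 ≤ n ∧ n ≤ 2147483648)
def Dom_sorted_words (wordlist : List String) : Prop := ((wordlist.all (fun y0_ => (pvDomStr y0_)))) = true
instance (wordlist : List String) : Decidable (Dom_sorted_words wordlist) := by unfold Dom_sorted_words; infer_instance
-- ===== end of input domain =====

-- B replaces A's per-word sort-and-rebuild filter with an adjacent-pair check before the final sort.


-- ===== PORT A =====
def sorted_words (wordlist : List String) : List String :=
  -- for i in range(0, len(wordlist)): sortedlist.append(sorted(wordlist[i]))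
  let sortedlist : List (List Char) :=
    (PySem.List.pyRange 0 wordlist.length 1).foldl
      (fun acc i => acc ++ [PySem.List.sorted (PySem.List.pyGetD wordlist i "").toList (fun c => c) false]) []
  -- for i …: for j …: word = word + sortedlist[i][j]; wordfix.append(word); word = ''
  let wordfix : List String :=
    (PySem.List.pyRange 0 sortedlist.length 1).foldl
      (fun acc i =>
        let row := PySem.List.pyGetD sortedlist i []
        let word : List Char :=
          (PySem.List.pyRange 0 row.length 1).foldl (fun w j => w ++ [PySem.List.pyGetD row j ' ']) []
        acc ++ [String.ofList word]) []
  -- for i in range(len(wordfix)): if wordfix[i] == wordlist[i]: returnlist.append(wordfix[i])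
  let returnlist : List String :=
    (PySem.List.pyRange 0 wordfix.length 1).foldl
      (fun acc i =>
        if PySem.List.pyGetD wordfix i "" = PySem.List.pyGetD wordlist i ""
        then acc ++ [PySem.List.pyGetD wordfix i ""] else acc) []
  -- returnlist.sort()
  PySem.List.sorted returnlist (fun x => x) false

-- ===== PORT B =====
-- all(a <= b for a, b in zip(w, w[1:]))
def pvAdjSorted (w : String) : Bool :=
  (w.toList.zip w.toList.tail).all (fun p => p.1 ≤ p.2)

def sorted_words_alt (wordlist : List String) : List String :=
  PySem.List.sorted (wordlist.filter pvAdjSorted) (fun x => x) false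

-- ===== PRECONDITION & SPEC =====
def Spec_sorted_words (wordlist : List String) (out : List String) : Prop := out = sorted_words_alt wordlist
instance (wordlist : List String) (out : List String) : Decidable (Spec_sorted_words wordlist out) := by unfold Spec_sorted_words; infer_instance

-- ===== CLAIM (what is proved, stated in full; the proofs are below) =====
def Claim_equal_sorted_words : Prop := ∀ (wordlist : List String), Dom_sorted_words wordlist → Spec_sorted_words wordlist (sorted_words wordlist)

-- ===== LEMMAS AND PROOFS =====

-- the adjacent-pair check is exactly "the char list is pairwise ≤"
lemma zipall_iff (l : List Char) :
    ((l.zip l.tail).all (fun p => p.1 ≤ p.2) = true) ↔ l.Pairwise (· ≤ ·) := by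
  rw [← List.isChain_iff_pairwise]
  induction l with
  | nil => simp
  | cons a t ih =>
    cases t with
    | nil => simp
    | cons b u =>
      simp only [List.tail_cons, List.zip_cons_cons, List.all_cons, Bool.and_eq_true,
        List.isChain_cons_cons] at *
      constructor
      · rintro ⟨h1, h2⟩; exact ⟨of_decide_eq_true h1, ih.mp h2⟩
      · rintro ⟨h1, h2⟩; exact ⟨decide_eq_true h1, ih.mpr h2⟩

-- A's per-word condition ("sorted(w) joined back equals w") is B's adjacent check
lemma sorted_toList_eq_iff (w : String) :
    (String.ofList (PySem.List.sorted w.toList (fun c => c) false) = w) ↔ pvAdjSorted w = true := by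
  rw [pvAdjSorted, zipall_iff]
  constructor
  · intro h
    have h2 : PySem.List.sorted w.toList (fun c => c) false = w.toList := by
      have := congrArg String.toList h
      simpa using this
    rw [← h2]
    simpa using PySem.List.sorted_pairwise w.toList (fun c => c)
  · intro h
    rw [PySem.List.sorted_eq_self_of_pairwise _ _ (by simpa using h)]
    simp [String.ofList]

-- A's inner character-copy loop rebuilds the row
lemma inner_word (row : List Char) :
    (PySem.List.pyRange 0 row.length 1).foldl (fun w j => w ++ [PySem.List.pyGetD row j ' ']) [] = row := by
  rw [PySem.List.foldl_pyRange_zero_pyGetD' row ' ' (fun w c => w ++ [c]) [],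
     PySem.List.foldl_append_singleton_eq_self]
  simp

-- A's index-driven comparison loop is a filter over the word list
lemma index_loop_eq (g : String → String) :
    ∀ (xs : List String) (acc : List String),
    (List.range xs.length).foldl
      (fun acc k => if (xs.map g).getD k "" = xs.getD k ""
                    then acc ++ [(xs.map g).getD k ""] else acc) acc
    = acc ++ ((xs.filter (fun w => g w = w)).map g) := by
  intro xs
  induction xs with
  | nil => simp
  | cons w t ih =>
    intro acc
    rw [List.length_cons, List.range_succ_eq_map, List.foldl_cons, List.foldl_map]
    simp only [List.map_cons, List.getD_cons_zero, List.getD_cons_succ]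
    rw [ih]
    by_cases h : g w = w
    · simp [h]
    · simp [h]

-- ===== VERDICT (by name: the statement is the Claim_ definition above) =====
theorem sorted_words_spec : Claim_equal_sorted_words := by
  intro wordlist _
  unfold Spec_sorted_words sorted_words sorted_words_alt
  -- first loop: sortedlist = map of per-word sorted char lists
  rw [PySem.List.foldl_pyRange_zero_pyGetD' wordlist ""
       (fun acc w => acc ++ [PySem.List.sorted w.toList (fun c => c) false]) [],
     PySem.List.foldl_append_singleton_eq_map, List.nil_append]
  -- second loop: wordfix = map String.ofList
  simp only [inner_word]
  rw [PySem.List.foldl_pyRange_zero_pyGetD' _ []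
       (fun acc row => acc ++ [String.ofList row]) [],
     PySem.List.foldl_append_singleton_eq_map, List.nil_append, List.map_map]
  -- third loop: returnlist = filter
  set g : String → String :=
    (fun row => String.ofList row) ∘ (fun w => PySem.List.sorted w.toList (fun c => c) false) with hg
  rw [List.length_map, PySem.List.pyRange_zero_nat, List.foldl_map]
  simp only [PySem.List.pyGetD_natCast]
  rw [index_loop_eq g wordlist [], List.nil_append]
  congr 1
  have hmem : ∀ w ∈ wordlist.filter (fun w => decide (g w = w)), g w = w := by
    intro w hw
    exact of_decide_eq_true (List.mem_filter.mp hw).2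
  rw [List.map_congr_left hmem]
  simp only [List.map_id']
  apply List.filter_congr
  intro w _
  have := sorted_toList_eq_iff w
  simp only [hg, Function.comp] at *
  cases hb : pvAdjSorted w
  · simp only [decide_eq_false_iff_not]
    intro hc
    have h2 := this.mp hc
    rw [hb] at h2
    exact Bool.false_ne_true h2
  · simp only [decide_eq_true_eq]
    exact this.mpr hb
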